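-- pv_equiv track=rewrite | github.com/garbaazareyaya-maker/a | passchanger.py | text_processing
-- ===== SOURCE A (Python) =====
-- def text_processing(text, iterations=1000):
--     """CPU-intensive text processing operations"""
--     processed = text
--     for i in range(iterations):
--         # Complex string operations
--         processed = ''.join(reversed(processed))
--         processed = processed.upper() if i % 2 == 0 else processed.lower()
--         processed = processed.replace('a', '1').replace('1', 'a')
--         processed = processed[:len(processed)//2] + processed[len(processed)//2:]
--     return processed
-- ===== SOURCE B (Python) =====
-- def text_processing(text, iterations=1000):
--     """O(n) re-implementation: only reversal parity, the final iteration's case,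
--     and the one-time '1'->'a' normalization survive the loop."""
--     if iterations <= 0:
--         return text
--     s = text[::-1] if iterations % 2 == 1 else text
--     if iterations == 1:
--         # the sole upper() runs before '1' is turned into 'a'
--         return s.upper().replace('1', 'a')
--     if iterations % 2 == 1:
--         # last iteration index is even -> upper; former '1's are cased too
--         return ''.join('A' if c == '1' else c.upper() for c in s)
--     return ''.join('a' if c == '1' else c.lower() for c in s)
-- ===== Notes on version B (the rewrite author's own statement) =====
-- stated objective: faster
-- what changed: B replaces A's iterations-long loop of reverse/case/replace/slice passes by a single O(n) pass: only the reversal parity, the final iteration's casing, and the one-time '1'->'a' normalization (which is cased on later iterations) determine the result.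
import Mathlib
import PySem

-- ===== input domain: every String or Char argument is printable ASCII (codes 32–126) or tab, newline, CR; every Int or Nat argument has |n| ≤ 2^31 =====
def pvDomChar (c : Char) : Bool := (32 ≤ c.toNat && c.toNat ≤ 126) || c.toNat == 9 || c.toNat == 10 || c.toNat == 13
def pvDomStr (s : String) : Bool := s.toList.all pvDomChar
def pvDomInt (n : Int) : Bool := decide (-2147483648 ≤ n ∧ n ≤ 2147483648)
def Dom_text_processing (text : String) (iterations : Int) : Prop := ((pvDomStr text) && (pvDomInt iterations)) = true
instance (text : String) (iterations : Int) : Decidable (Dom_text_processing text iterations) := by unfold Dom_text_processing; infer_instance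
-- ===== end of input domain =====

-- B collapses A's loop into one pass: only the reversal parity, the last iteration's
-- casing and the one-time '1'→'a' normalization survive (objective: faster).

-- ===== PORT A =====
-- one body of A's loop, on the code-point list (string ops are handled on List Char per PySem)
def pvStepA (processed : List Char) (i : Int) : List Char :=
  let p1 := processed.reverse                                   -- ''.join(reversed(processed))
  let p2 := if PySem.Int.mod i 2 == 0 then PySem.Chars.upper p1 else PySem.Chars.lower p1
  let p3 := PySem.Chars.replace (PySem.Chars.replace p2 ['a'] ['1']) ['1'] ['a']
  PySem.List.slice p3 none (some (PySem.Int.floordiv (PySem.Chars.len p3) 2)) ++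
    PySem.List.slice p3 (some (PySem.Int.floordiv (PySem.Chars.len p3) 2)) none

def text_processing (text : String) (iterations : Int) : String :=
  String.ofList ((PySem.List.pyRange 0 iterations 1).foldl pvStepA text.toList)

-- ===== PORT B =====
def pvUpper1 (c : Char) : Char := if c == '1' then 'A' else PySem.Chars.upperChar c
def pvLower1 (c : Char) : Char := if c == '1' then 'a' else PySem.Chars.lowerChar c

def text_processing_alt (text : String) (iterations : Int) : String :=
  if iterations ≤ 0 then text
  else
    -- s = text[::-1] if odd else text  (s[::-1] is reverse: PySem.List.slice?_none_none_neg_one)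
    let s : List Char := if PySem.Int.mod iterations 2 == 1 then text.toList.reverse else text.toList
    if iterations == 1 then
      String.ofList (PySem.Chars.replace (PySem.Chars.upper s) ['1'] ['a'])
    else if PySem.Int.mod iterations 2 == 1 then
      String.ofList (s.map pvUpper1)
    else
      String.ofList (s.map pvLower1)

-- ===== PRECONDITION & SPEC =====
def Spec_text_processing (text : String) (iterations : Int) (out : String) : Prop := out = text_processing_alt text iterations
instance (text : String) (iterations : Int) (out : String) : Decidable (Spec_text_processing text iterations out) := by unfold Spec_text_processing; infer_instance

-- ===== CLAIM (what is proved, stated in full; the proofs are below) =====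
def Claim_equal_text_processing : Prop := ∀ (text : String) (iterations : Int), Dom_text_processing text iterations → Spec_text_processing text iterations (text_processing text iterations)

-- ===== LEMMAS AND PROOFS =====

lemma pvToNat_inj {c d : Char} (h : c.toNat = d.toNat) : c = d :=
  Char.ext (UInt32.toNat_inj.mp h)

lemma pvToNat_upperChar (c : Char) :
    (PySem.Chars.upperChar c).toNat = if 97 ≤ c.toNat ∧ c.toNat ≤ 122 then c.toNat - 32 else c.toNat := by
  unfold PySem.Chars.upperChar PySem.Chars.islower
  have hiff : (('a' ≤ c ∧ c ≤ 'z')) ↔ (97 ≤ c.toNat ∧ c.toNat ≤ 122) := Iff.rfl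
  by_cases h : 97 ≤ c.toNat ∧ c.toNat ≤ 122
  · rw [if_pos (by simpa using hiff.mpr h), if_pos h, Char.toNat_ofNat, if_pos (Or.inl (by omega))]
  · rw [if_neg (by simpa using fun a b => h (hiff.mp ⟨a, b⟩)), if_neg h]

lemma pvToNat_lowerChar (c : Char) :
    (PySem.Chars.lowerChar c).toNat = if 65 ≤ c.toNat ∧ c.toNat ≤ 90 then c.toNat + 32 else c.toNat := by
  unfold PySem.Chars.lowerChar PySem.Chars.isupper
  have hiff : (('A' ≤ c ∧ c ≤ 'Z')) ↔ (65 ≤ c.toNat ∧ c.toNat ≤ 90) := Iff.rfl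
  by_cases h : 65 ≤ c.toNat ∧ c.toNat ≤ 90
  · rw [if_pos (by simpa using hiff.mpr h), if_pos h, Char.toNat_ofNat, if_pos (Or.inl (by omega))]
  · rw [if_neg (by simpa using fun a b => h (hiff.mp ⟨a, b⟩)), if_neg h]

-- per-character facts (they hold for every Char, so no Dom hypothesis is needed)
lemma pvUpper_ne_a (c : Char) : PySem.Chars.upperChar c ≠ 'a' := by
  intro h
  have := congrArg Char.toNat h
  rw [pvToNat_upperChar] at this
  have h97 : ('a').toNat = 97 := rfl
  rw [h97] at this; split_ifs at this <;> omega

lemma pvUpper_eq_one (c : Char) (h : PySem.Chars.upperChar c = '1') : c = '1' := by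
  have := congrArg Char.toNat h
  rw [pvToNat_upperChar] at this
  have h49 : ('1').toNat = 49 := rfl
  rw [h49] at this
  split_ifs at this with hr
  · omega
  · exact pvToNat_inj (by rw [this, h49])

lemma pvLower_eq_one (c : Char) (h : PySem.Chars.lowerChar c = '1') : c = '1' := by
  have := congrArg Char.toNat h
  rw [pvToNat_lowerChar] at this
  have h49 : ('1').toNat = 49 := rfl
  rw [h49] at this
  split_ifs at this with hr
  · omega
  · exact pvToNat_inj (by rw [this, h49])

lemma pvUpper_lower (c : Char) :
    PySem.Chars.upperChar (PySem.Chars.lowerChar c) = PySem.Chars.upperChar c := by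
  apply pvToNat_inj
  rw [pvToNat_upperChar, pvToNat_upperChar, pvToNat_lowerChar]
  split_ifs <;> omega

lemma pvLower_upper (c : Char) :
    PySem.Chars.lowerChar (PySem.Chars.upperChar c) = PySem.Chars.lowerChar c := by
  apply pvToNat_inj
  rw [pvToNat_lowerChar, pvToNat_lowerChar, pvToNat_upperChar]
  split_ifs <;> omega

-- single-character str.replace is a per-character map
lemma pvReplaceGo (x y : Char) (fuel : Nat) (cs acc : List Char) (h : cs.length ≤ fuel) :
    PySem.Chars.replace.go [x] [y] fuel cs acc
      = acc.reverse ++ cs.map (fun c => if c = x then y else c) := by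
  induction fuel generalizing cs acc with
  | zero =>
    have : cs = [] := List.length_eq_zero_iff.mp (by omega)
    subst this
    simp [PySem.Chars.replace.go]
  | succ n ih =>
    cases cs with
    | nil => simp [PySem.Chars.replace.go]
    | cons c t =>
      simp only [List.length_cons] at h
      rw [PySem.Chars.replace.go]
      by_cases hc : c = x
      · subst hc
        rw [if_pos (by simp [List.isPrefixOf])]
        simp only [List.length_singleton, List.drop_succ_cons, List.drop_zero, List.reverse_singleton]
        rw [ih t ([y] ++ acc) (by omega)]
        simp
      · rw [if_neg (by simp [List.isPrefixOf, hc, Ne.symm])]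
        rw [ih t (c :: acc) (by omega)]
        simp [hc]

lemma pvReplace_single (x y : Char) (cs : List Char) :
    PySem.Chars.replace cs [x] [y] = cs.map (fun c => if c = x then y else c) := by
  unfold PySem.Chars.replace
  rw [if_neg (by simp)]
  simpa using pvReplaceGo x y cs.length cs [] le_rfl

-- s[:len(s)//2] + s[len(s)//2:] = s
lemma pvSliceId (l : List Char) :
    PySem.List.slice l none (some (PySem.Int.floordiv (PySem.Chars.len l) 2)) ++
      PySem.List.slice l (some (PySem.Int.floordiv (PySem.Chars.len l) 2)) none = l := by
  have hlen : PySem.Chars.len l = ((l.length : Nat) : Int) := rfl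
  have h2 : PySem.Int.floordiv ((l.length : Nat) : Int) 2 = ((l.length / 2 : Nat) : Int) := by
    exact_mod_cast PySem.Int.floordiv_natCast l.length 2
  rw [hlen, h2, PySem.List.slice_to_natCast, PySem.List.slice_from_natCast, List.take_append_drop]

-- the state of A's loop after N ≥ 1 iterations
def pvG (N : Nat) : Char → Char :=
  if N = 1 then fun c => if c = '1' then 'a' else PySem.Chars.upperChar c
  else if N % 2 = 1 then fun c => if c = '1' then 'A' else PySem.Chars.upperChar c
  else fun c => if c = '1' then 'a' else PySem.Chars.lowerChar c

def pvModel (N : Nat) (t : List Char) : List Char :=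
  if N % 2 = 1 then (t.map (pvG N)).reverse else t.map (pvG N)

lemma pvMod_two (N : Nat) : PySem.Int.mod (N : Int) 2 = ((N % 2 : Nat) : Int) := by
  exact_mod_cast PySem.Int.mod_natCast N 2

lemma pvStep_base (t : List Char) : pvStepA t 0 = pvModel 1 t := by
  unfold pvStepA pvModel pvG
  rw [if_pos (by decide)]
  simp only [PySem.Chars.upper, pvReplace_single, pvSliceId, List.map_map]
  norm_num
  intro c _
  simp only [pvUpper_ne_a c, not_false_iff, true_implies]
  by_cases hc : c = '1'
  · subst hc; decide
  · rw [if_neg (fun h => hc (pvUpper_eq_one c h)), if_neg hc]; simp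

lemma pvStep_succ (t : List Char) (N : Nat) (h : 1 ≤ N) :
    pvStepA (pvModel N t) (N : Int) = pvModel (N + 1) t := by
  unfold pvStepA
  rw [pvMod_two N]
  rcases Nat.even_or_odd N with he | ho
  · -- N even (so N ≥ 2): this iteration uppercases; the result has odd parity
    have h0 : N % 2 = 0 := Nat.even_iff.mp he
    rw [show (((N % 2 : Nat) : Int) == 0) = true by simp [h0]]
    simp only [if_true]
    rw [show pvModel N t = t.map (pvG N) by unfold pvModel; rw [if_neg (by omega)]]
    rw [show pvG N = fun c => if c = '1' then 'a' else PySem.Chars.lowerChar c by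
      unfold pvG; rw [if_neg (by omega), if_neg (by omega)]]
    simp only [PySem.Chars.upper, pvReplace_single, pvSliceId, List.map_map, List.map_reverse]
    rw [show pvModel (N + 1) t = (t.map (pvG (N + 1))).reverse by
      unfold pvModel; rw [if_pos (by omega)]]
    rw [show pvG (N + 1) = fun c => if c = '1' then 'A' else PySem.Chars.upperChar c by
      unfold pvG; rw [if_neg (by omega), if_pos (by omega)]]
    congr 1
    apply List.map_congr_left
    intro c _
    by_cases hc : c = '1'
    · subst hc; decide
    · simp only [Function.comp_apply, if_neg hc, pvUpper_lower c,
        if_neg (pvUpper_ne_a c)]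
      rw [if_neg (fun hh => hc (pvUpper_eq_one c hh))]
  · -- N odd: this iteration lowercases; the result has even parity
    have h1 : N % 2 = 1 := Nat.odd_iff.mp ho
    rw [show (((N % 2 : Nat) : Int) == 0) = false by simp [h1]]
    simp only [if_false, Bool.false_eq_true]
    rw [show pvModel N t = (t.map (pvG N)).reverse by unfold pvModel; rw [if_pos h1]]
    simp only [List.reverse_reverse, PySem.Chars.lower, pvReplace_single, pvSliceId, List.map_map]
    rw [show pvModel (N + 1) t = t.map (pvG (N + 1)) by
      unfold pvModel; rw [if_neg (by omega)]]
    rw [show pvG (N + 1) = fun c => if c = '1' then 'a' else PySem.Chars.lowerChar c by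
      unfold pvG; rw [if_neg (by omega), if_neg (by omega)]]
    apply List.map_congr_left
    intro c _
    have hgN : pvG N c = if c = '1' then (if N = 1 then 'a' else 'A') else PySem.Chars.upperChar c := by
      unfold pvG
      by_cases hN1 : N = 1
      · rw [if_pos hN1, if_pos hN1]
      · rw [if_neg hN1, if_pos h1, if_neg hN1]
    simp only [Function.comp_apply, hgN]
    by_cases hc : c = '1'
    · subst hc
      by_cases hN1 : N = 1 <;> simp [hN1] <;> decide
    · simp only [if_neg hc, pvLower_upper c]
      by_cases hla : PySem.Chars.lowerChar c = 'a'
      · rw [if_pos hla, if_pos rfl, hla]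
      · rw [if_neg hla, if_neg (fun hh => hc (pvLower_eq_one c hh))]

lemma pvFold (t : List Char) (N : Nat) (h : 1 ≤ N) :
    (PySem.List.pyRange 0 (N : Int) 1).foldl pvStepA t = pvModel N t := by
  induction N with
  | zero => omega
  | succ n ih =>
    by_cases hn : n = 0
    · subst hn
      have h1 : PySem.List.pyRange 0 (1 : Int) 1 = [0] := by decide
      simpa [h1] using pvStep_base t
    · have hn1 : 1 ≤ n := by omega
      rw [show ((n + 1 : Nat) : Int) = (n : Int) + 1 by push_cast; ring,
        PySem.List.pyRange_one_succ_right (by positivity), List.foldl_append, ih hn1]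
      simpa using pvStep_succ t n hn1

-- ===== VERDICT (by name: the statement is the Claim_ definition above) =====
theorem text_processing_spec : Claim_equal_text_processing := by
  intro text iterations _
  unfold Spec_text_processing text_processing text_processing_alt
  by_cases hle : iterations ≤ 0
  · rw [if_pos hle, PySem.List.pyRange_one_eq_nil hle]
    simp
  · rw [Int.not_le] at hle
    obtain ⟨N, hNe, hN1⟩ : ∃ N : Nat, iterations = (N : Int) ∧ 1 ≤ N :=
      ⟨iterations.toNat, by omega, by omega⟩
    subst hNe
    rw [if_neg (by exact_mod_cast (by omega : ¬ ((N : Int) ≤ 0)))]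
    rw [pvFold text.toList N hN1]
    by_cases hN : N = 1
    · subst hN
      rw [show (((1 : Nat) : Int) == 1) = true by decide,
        show (PySem.Int.mod ((1 : Nat) : Int) 2 == 1) = true by decide]
      simp only [if_true]
      rw [pvReplace_single, PySem.Chars.upper, List.map_map]
      unfold pvModel pvG
      norm_num
      congr 2
      apply List.map_congr_left
      intro c _
      simp only [Function.comp_apply]
      by_cases hc : c = '1'
      · subst hc; decide
      · rw [if_neg (fun h => hc (pvUpper_eq_one c h)), if_neg hc]
    · have hne1 : (((N : Nat) : Int) == 1) = false := by
        simp only [beq_eq_false_iff_ne, ne_eq]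
        exact_mod_cast hN
      rw [hne1, pvMod_two N]
      rcases Nat.even_or_odd N with he | ho
      · have h0 : N % 2 = 0 := Nat.even_iff.mp he
        rw [show (((N % 2 : Nat) : Int) == 1) = false by simp [h0]]
        simp only [Bool.false_eq_true, if_false]
        unfold pvModel
        rw [if_neg (by omega)]
        congr 1
        apply List.map_congr_left
        intro c _
        rw [show pvG N c = if c = '1' then 'a' else PySem.Chars.lowerChar c by
          unfold pvG; rw [if_neg hN, if_neg (by omega)]]
        simp [pvLower1, beq_iff_eq]
      · have h1 : N % 2 = 1 := Nat.odd_iff.mp ho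
        rw [show (((N % 2 : Nat) : Int) == 1) = true by simp [h1]]
        simp only [if_true]
        unfold pvModel
        rw [if_pos h1, ← List.map_reverse]
        congr 1
        apply List.map_congr_left
        intro c _
        rw [show pvG N c = if c = '1' then 'A' else PySem.Chars.upperChar c by
          unfold pvG; rw [if_neg hN, if_pos h1]]
        simp [pvUpper1, beq_iff_eq]
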